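-- pv_equiv track=rewrite | github.com/Salah-SH/LLM_SC_audits | call_graph.py | generate_call_code_list
-- ===== SOURCE A (Python) =====
-- def generate_call_code_list(functions, call_graph):
--     call_code_list_all=[]
--     def dfs(function):
--         if function not in call_code_list:
--             call_code_list.append(function)
--             if function in call_graph:
--                 dfs(call_graph[function])
--
--         return call_code_list
--     for function in functions:
--         call_code_list = []
--         call_code_list_all.append(dfs(function))
--     return call_code_list_all
-- ===== SOURCE B (Python) =====
-- def generate_call_code_list(functions, call_graph):
--     # Staged: (1) unfold the raw successor path, (2) cut it at the first repeated node.
--     fuel = len(call_graph) + 1  # a chain never holds more distinct nodes than keys + start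
--
--     def path(f, fuel):
--         if fuel and f in call_graph:
--             return [f] + path(call_graph[f], fuel - 1)
--         return [f]
--
--     def cut(seen, p):
--         if not p or p[0] in seen:
--             return seen
--         return cut(seen + [p[0]], p[1:])
--
--     return [cut([], path(f, fuel)) for f in functions]
-- ===== Notes on version B (the rewrite author's own statement) =====
-- stated objective: alternative
-- what changed: Replaces A's single recursive dfs (membership test, append and graph lookup interleaved in one closure) by two staged passes: first unfold the raw successor path with bounded fuel, then cut that path at the first repeated node.
import Mathlib
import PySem

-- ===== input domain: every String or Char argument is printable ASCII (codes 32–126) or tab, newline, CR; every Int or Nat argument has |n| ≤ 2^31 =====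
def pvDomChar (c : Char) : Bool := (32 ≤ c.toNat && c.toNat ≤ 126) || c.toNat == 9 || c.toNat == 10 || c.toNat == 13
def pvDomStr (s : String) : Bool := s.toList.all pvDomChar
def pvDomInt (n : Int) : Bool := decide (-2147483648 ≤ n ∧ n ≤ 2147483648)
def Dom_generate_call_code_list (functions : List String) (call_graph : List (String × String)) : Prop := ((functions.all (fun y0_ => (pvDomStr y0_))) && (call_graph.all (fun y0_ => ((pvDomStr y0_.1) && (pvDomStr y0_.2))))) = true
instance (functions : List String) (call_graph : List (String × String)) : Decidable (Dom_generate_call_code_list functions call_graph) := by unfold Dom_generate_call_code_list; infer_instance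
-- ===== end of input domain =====

-- B replaces A's single recursive dfs by two staged passes (unfold the raw successor path, then cut at the first repeat): alternative decomposition, same cost.

-- ===== PORT A =====
-- dfs(function): the closure-captured call_code_list becomes the explicit `chain` argument; fuel bounds the recursion
-- depth (each recursive call appends a fresh element, so depth ≤ call_graph.length + 2 and the fuel is never exhausted).
def pvDfsA (g : List (String × String)) : Nat → List String → String → List String
  | 0, chain, _ => chain
  | fuel+1, chain, f =>
    if f ∈ chain then chain
    else
      match (PySem.Dict.mk g).get? f with
      | some nxt => pvDfsA g fuel (chain ++ [f]) nxt
      | none => chain ++ [f]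

def generate_call_code_list (functions : List String) (call_graph : List (String × String)) : List (List String) :=
  functions.foldl (fun acc f => acc ++ [pvDfsA call_graph (call_graph.length + 2) [] f]) []

-- ===== PORT B =====
-- stage 1 of Source B: unfold the raw successor path (fuel = len(call_graph)+1 bounds it, as in Source B)
def pvPathB (g : List (String × String)) : Nat → String → List String
  | 0, f => [f]
  | fuel+1, f =>
    match (PySem.Dict.mk g).get? f with
    | some nxt => f :: pvPathB g fuel nxt
    | none => [f]

-- stage 2 of Source B: keep the prefix of the path up to (excluding) the first repeated node
def pvCutB (seen : List String) : List String → List String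
  | [] => seen
  | x :: xs => if x ∈ seen then seen else pvCutB (seen ++ [x]) xs

def generate_call_code_list_alt (functions : List String) (call_graph : List (String × String)) : List (List String) :=
  functions.map (fun f => pvCutB [] (pvPathB call_graph (call_graph.length + 1) f))

-- ===== PRECONDITION & SPEC =====
def Spec_generate_call_code_list (functions : List String) (call_graph : List (String × String)) (out : List (List String)) : Prop := out = generate_call_code_list_alt functions call_graph
instance (functions : List String) (call_graph : List (String × String)) (out : List (List String)) : Decidable (Spec_generate_call_code_list functions call_graph out) := by unfold Spec_generate_call_code_list; infer_instance

-- ===== CLAIM (what is proved, stated in full; the proofs are below) =====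
def Claim_equal_generate_call_code_list : Prop := ∀ (functions : List String) (call_graph : List (String × String)), Dom_generate_call_code_list functions call_graph → Spec_generate_call_code_list functions call_graph (generate_call_code_list functions call_graph)

-- ===== LEMMAS AND PROOFS =====
theorem pvDfsA_succ (g : List (String × String)) (n : Nat) (chain : List String) (f : String) :
    pvDfsA g (n+1) chain f =
      (if f ∈ chain then chain
       else
        match (PySem.Dict.mk g).get? f with
        | some nxt => pvDfsA g n (chain ++ [f]) nxt
        | none => chain ++ [f]) := rfl

theorem pvCut_path_eq_dfs (g : List (String × String)) (m : Nat) (chain : List String) (f : String) :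
    pvCutB chain (pvPathB g m f) = pvDfsA g (m + 1) chain f := by
  induction m generalizing chain f with
  | zero =>
    rw [pvDfsA_succ]
    simp only [pvPathB, pvCutB]
    by_cases h : f ∈ chain
    · simp [h]
    · cases hg : (PySem.Dict.mk g).get? f <;> simp [h, pvDfsA]
  | succ k ih =>
    rw [pvDfsA_succ]
    simp only [pvPathB]
    cases hg : (PySem.Dict.mk g).get? f with
    | none =>
      simp only [pvCutB]
    | some nxt =>
      simp only [pvCutB]
      by_cases h : f ∈ chain
      · simp [h]
      · simp only [h, if_false]
        exact ih (chain ++ [f]) nxt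

theorem pv_foldl_append_map (l : List String) (k : String → List String) (acc : List (List String)) :
    l.foldl (fun acc f => acc ++ [k f]) acc = acc ++ l.map k := by
  induction l generalizing acc with
  | nil => simp
  | cons x xs ih => simp [List.foldl, ih]

-- ===== VERDICT (by name: the statement is the Claim_ definition above) =====
theorem generate_call_code_list_spec : Claim_equal_generate_call_code_list := by
  intro functions call_graph _
  unfold Spec_generate_call_code_list generate_call_code_list generate_call_code_list_alt
  rw [pv_foldl_append_map]
  simp [pvCut_path_eq_dfs]
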